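-- pv_equiv track=rewrite | github.com/zgwuthu/MOSAIC | mutation_less_than_10_part1.py | feature_match_worker
-- ===== SOURCE A (Python) =====
-- from collections import defaultdict
-- from typing import Dict, List, Tuple, Set
--
-- def extract_feature_sequences(gene_seq: str) -> Tuple[str, str, str]:
--     """Extract three feature sequences from gene"""
--     feature1 = gene_seq[:20]
--
--     if len(gene_seq) >= 120:
--         feature2 = gene_seq[100:120]
--     else:
--         feature2 = ""
--
--     feature3 = gene_seq[-20:] if len(gene_seq) >= 20 else ""
--
--     return feature1, feature2, feature3
--
-- def feature_match_worker(args):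
--     """Feature match worker process - collect matching reads"""
--     batch_seqs, unmatched_genes_dict = args
--     gene_reads = defaultdict(list)
--
--     for gene, seq in unmatched_genes_dict.items():
--         feature1, feature2, feature3 = extract_feature_sequences(seq)
--         if not (feature1 and feature2 and feature3):
--             continue
--
--         for read_seq in batch_seqs:
--             if (feature1 in read_seq and
--                 feature2 in read_seq and
--                 feature3 in read_seq):
--                 gene_reads[gene].append(read_seq)
--
--     return gene_reads
-- ===== SOURCE B (Python) =====
-- def feature_match_worker(args):
--     """Feature match worker: precompute each read's set of 20-mers once,
--     then test the three (20-char) gene features by set membership."""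
--     batch_seqs, unmatched_genes_dict = args
--     k = 20
--     kmer_sets = [
--         {read[i:i + k] for i in range(len(read) - k + 1)}
--         for read in batch_seqs
--     ]
--     gene_reads = {}
--     for gene, seq in unmatched_genes_dict.items():
--         if len(seq) < 120:
--             continue
--         f1, f2, f3 = seq[:20], seq[100:120], seq[-20:]
--         matches = [read for read, ks in zip(batch_seqs, kmer_sets)
--                    if f1 in ks and f2 in ks and f3 in ks]
--         if matches:
--             gene_reads[gene] = matches
--     return gene_reads
-- ===== Notes on version B (the rewrite author's own statement) =====
-- stated objective: alternative
-- what changed: Instead of scanning every read for each gene's three feature substrings, B precomputes each read's set of 20-mers once and tests the three (always 20-char) features by set membership, skipping genes shorter than 120 directly; same results, cost traded from per-gene substring scans to one up-front index.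
import Mathlib
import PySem

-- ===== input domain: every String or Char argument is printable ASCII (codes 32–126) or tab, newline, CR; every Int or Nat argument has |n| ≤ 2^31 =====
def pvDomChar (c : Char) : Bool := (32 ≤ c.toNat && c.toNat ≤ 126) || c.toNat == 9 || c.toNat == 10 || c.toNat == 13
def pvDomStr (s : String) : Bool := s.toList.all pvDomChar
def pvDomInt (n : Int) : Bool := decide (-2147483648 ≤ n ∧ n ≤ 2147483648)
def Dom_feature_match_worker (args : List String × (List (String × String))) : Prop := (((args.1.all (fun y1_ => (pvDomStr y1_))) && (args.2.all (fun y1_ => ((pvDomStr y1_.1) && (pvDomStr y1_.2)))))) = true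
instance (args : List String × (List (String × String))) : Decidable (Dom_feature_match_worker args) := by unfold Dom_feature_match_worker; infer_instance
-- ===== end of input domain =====

-- B replaces A's per-gene × per-read substring scans by one precomputed set of 20-mers per read
-- and set-membership tests (every feature of a processed gene is exactly 20 characters long).

-- ===== PORT A =====
def extract_feature_sequences (gene_seq : String) : String × String × String :=
  let feature1 := PySem.Str.slice gene_seq none (some 20)
  let feature2 := if 120 ≤ PySem.Str.len gene_seq
    then PySem.Str.slice gene_seq (some 100) (some 120) else ""
  let feature3 := if 20 ≤ PySem.Str.len gene_seq
    then PySem.Str.slice gene_seq (some (-20)) none else ""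
  (feature1, feature2, feature3)

def feature_match_worker (args : List String × (List (String × String))) : List (String × List String) :=
  let batch_seqs := args.1
  let unmatched_genes_dict := PySem.Dict.ofList args.2
  let gene_reads : PySem.Dict String (List String) :=
    unmatched_genes_dict.items.foldl (fun gr gs =>
      let fs := extract_feature_sequences gs.2
      if fs.1 = "" ∨ fs.2.1 = "" ∨ fs.2.2 = "" then gr
      else batch_seqs.foldl (fun gr read_seq =>
        if PySem.Str.isIn fs.1 read_seq && PySem.Str.isIn fs.2.1 read_seq
            && PySem.Str.isIn fs.2.2 read_seq
        then gr.modify gs.1 [] (· ++ [read_seq]) else gr) gr)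
      PySem.Dict.empty
  gene_reads.items

-- ===== PORT B =====
def kmerSet (read : String) : PySem.Set String :=
  PySem.Set.ofList ((PySem.List.pyRange 0 (PySem.Str.len read - 20 + 1)).map
    (fun i => PySem.Str.slice read (some i) (some (i + 20))))

def feature_match_worker_alt (args : List String × (List (String × String))) : List (String × List String) :=
  let batch_seqs := args.1
  let kmer_sets := batch_seqs.map kmerSet
  (PySem.Dict.ofList args.2).items.foldl (fun acc gs =>
    if PySem.Str.len gs.2 < 120 then acc
    else
      let f1 := PySem.Str.slice gs.2 none (some 20)
      let f2 := PySem.Str.slice gs.2 (some 100) (some 120)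
      let f3 := PySem.Str.slice gs.2 (some (-20)) none
      let hits := ((batch_seqs.zip kmer_sets).filter
        (fun p => PySem.Set.contains p.2 f1 && PySem.Set.contains p.2 f2
          && PySem.Set.contains p.2 f3)).map Prod.fst
      if hits = [] then acc else acc ++ [(gs.1, hits)]) []

-- ===== PRECONDITION & SPEC =====
def Spec_feature_match_worker (args : List String × (List (String × String))) (out : List (String × List String)) : Prop := out = feature_match_worker_alt args
instance (args : List String × (List (String × String))) (out : List (String × List String)) : Decidable (Spec_feature_match_worker args out) := by unfold Spec_feature_match_worker; infer_instance

-- ===== CLAIM (what is proved, stated in full; the proofs are below) =====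
def Claim_equal_feature_match_worker : Prop := ∀ (args : List String × (List (String × String))), Dom_feature_match_worker args → Spec_feature_match_worker args (feature_match_worker args)

-- ===== LEMMAS AND PROOFS =====

-- s ≠ "" iff its char list is nonempty
lemma str_ne_empty_of_toList {s : String} (h : s.toList ≠ []) : s ≠ "" := by
  intro he; exact h (by simp [he])

-- toList of the three feature slices
lemma toList_f1 (s : String) :
    (PySem.Str.slice s none (some 20)).toList = s.toList.take 20 := by
  simp [PySem.Str.slice, PySem.Chars.slice, PySem.List.slice_to]

lemma toList_f2 (s : String) :
    (PySem.Str.slice s (some 100) (some 120)).toList = (s.toList.drop 100).take 20 := by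
  simp [PySem.Str.slice, PySem.Chars.slice,
    PySem.List.slice_toNat s.toList (a := 100) (b := 120) (by norm_num) (by norm_num)]

lemma toList_f3 (s : String) :
    (PySem.Str.slice s (some (-20)) none).toList = s.toList.drop (s.toList.length - 20) := by
  simp [PySem.Str.slice, PySem.Chars.slice,
    PySem.List.slice_from_neg_ofNat s.toList 20 (by norm_num)]

-- the guard in A ("some feature is empty") is exactly len(seq) < 120
lemma gate_iff (s : String) :
    (let fs := extract_feature_sequences s
     fs.1 = "" ∨ fs.2.1 = "" ∨ fs.2.2 = "") ↔ PySem.Str.len s < 120 := by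
  simp only [extract_feature_sequences, PySem.Str.len_eq]
  by_cases h : 120 ≤ s.toList.length
  · rw [if_pos (by exact_mod_cast h), if_pos (by exact_mod_cast (by omega : 20 ≤ s.toList.length))]
    constructor
    · rintro (h1 | h2 | h3)
      · exact absurd h1 (str_ne_empty_of_toList (by
          rw [toList_f1]; intro he; have hh := congrArg List.length he
          rw [List.length_take, List.length_nil] at hh; omega))
      · exact absurd h2 (str_ne_empty_of_toList (by
          rw [toList_f2]; intro he; have hh := congrArg List.length he
          rw [List.length_take, List.length_drop, List.length_nil] at hh; omega))
      · exact absurd h3 (str_ne_empty_of_toList (by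
          rw [toList_f3]; intro he; have hh := congrArg List.length he
          rw [List.length_drop, List.length_nil] at hh; omega))
    · intro hl; exact absurd hl (by omega)
  · rw [if_neg (by exact_mod_cast h)]
    simp only []
    constructor
    · intro _; omega
    · intro _; right; left; trivial

-- a length-20 window slice, as a char list
lemma toList_slice_window (r : String) (i : Int) (hi : 0 ≤ i) :
    (PySem.Str.slice r (some i) (some (i + 20))).toList
      = (r.toList.drop i.toNat).take 20 := by
  have h20 : (i + 20).toNat - i.toNat = 20 := by omega
  simp [PySem.Str.slice, PySem.Chars.slice,
    PySem.List.slice_toNat r.toList hi (by omega : (0:Int) ≤ i + 20), h20]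

-- membership of a 20-char string in the 20-mer set equals Python's substring test
lemma contains_kmerSet (f r : String) (hf : f.toList.length = 20) :
    PySem.Set.contains (kmerSet r) f = PySem.Str.isIn f r := by
  rw [Bool.eq_iff_iff]
  rw [PySem.Set.contains_iff, kmerSet, PySem.Set.mem_ofList, List.mem_map]
  have hisin : PySem.Str.isIn f r = PySem.Chars.isIn f.toList r.toList := rfl
  rw [hisin, ← PySem.Chars.exists_prefix_drop_iff_isIn]
  constructor
  · rintro ⟨i, hi, hsl⟩
    rw [PySem.List.mem_pyRange_one] at hi
    refine ⟨i.toNat, ?_⟩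
    rw [← hsl, toList_slice_window r i hi.1]
    exact List.take_prefix _ _
  · rintro ⟨j, hpre⟩
    have hle : f.toList.length ≤ (r.toList.drop j).length := hpre.length_le
    rw [List.length_drop, hf] at hle
    refine ⟨(j : Int), ?_, ?_⟩
    · rw [PySem.List.mem_pyRange_one, PySem.Str.len_eq]
      exact ⟨by positivity, by omega⟩
    · rw [← String.toList_inj, toList_slice_window r j (by positivity)]
      rw [List.prefix_iff_eq_take, hf] at hpre
      rw [Int.toNat_natCast, ← hpre]

-- a filtered zip-with-map projects to a plain filter
lemma zip_map_filter {α β : Type} (g : α → β) (p : α × β → Bool) :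
    ∀ l : List α, (((l.zip (l.map g)).filter p).map Prod.fst)
      = l.filter (fun x => p (x, g x)) := by
  intro l; induction l with
  | nil => rfl
  | cons x l ih => simp only [List.map_cons, List.zip_cons_cons, List.filter_cons]
                   cases h : p (x, g x) <;> simp [*]

-- first-match lookup on a dict whose last (and only) entry with key g carries acc
lemma get?_append_last {ν : Type} (g : String) (acc : ν) :
    ∀ I : List (String × ν), g ∉ I.map Prod.fst →
      (PySem.Dict.mk (I ++ [(g, acc)])).get? g = some acc := by
  intro I; induction I with
  | nil => intro _; simp [PySem.Dict.get?_mk_cons]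
  | cons p I ih =>
    intro h
    simp only [List.map_cons, List.mem_cons, not_or] at h
    rw [List.cons_append, PySem.Dict.get?_mk_cons]
    simp only [beq_iff_eq]
    rw [if_neg (by exact fun he => h.1 he.symm), ih h.2]

-- replacing the entry at an absent key is the identity
lemma map_replace_id {ν : Type} (g : String) (v : ν) :
    ∀ I : List (String × ν), g ∉ I.map Prod.fst →
      I.map (fun p => if (p.1 == g) = true then (g, v) else p) = I := by
  intro I; induction I with
  | nil => intro _; rfl
  | cons p I ih =>
    intro h
    simp only [List.map_cons, List.mem_cons, not_or] at h
    rw [List.map_cons, ih h.2]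
    have : ¬ (p.1 == g) = true := by simp; exact fun he => h.1 he.symm
    rw [if_neg this]

-- folding appends at a key that sits last in the dict extends its value list
lemma foldl_modify_aux (g : String) :
    ∀ (m : List String) (I : List (String × List String)) (acc : List String)
      (d : PySem.Dict String (List String)),
      d.items = I ++ [(g, acc)] → g ∉ I.map Prod.fst →
      (m.foldl (fun d r => d.modify g [] (· ++ [r])) d).items = I ++ [(g, acc ++ m)] := by
  intro m; induction m with
  | nil => intro I acc d hd _; simpa using hd
  | cons r m ih =>
    intro I acc d hd hg
    have hdm : d = PySem.Dict.mk (I ++ [(g, acc)]) := PySem.Dict.ext hd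
    have hget : d.get? g = some acc := by rw [hdm]; exact get?_append_last g acc I hg
    have hcont : d.contains g = true := by
      rw [PySem.Dict.contains_eq_isSome_get?, hget]; rfl
    have hgetD : d.getD g [] = acc := PySem.Dict.getD_of_get?_eq_some d [] hget
    rw [List.foldl_cons]
    rw [ih I (acc ++ [r]) _ ?_ hg]
    · simp
    · show (d.insert g (d.getD g [] ++ [r])).items = _
      rw [PySem.Dict.items_insert_of_contains d _ hcont, hd, List.map_append,
        map_replace_id g _ I hg, hgetD]
      simp

-- the inner read loop over a fresh gene key appends one entry
lemma foldl_modify_items (g : String) (m : List String)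
    (d : PySem.Dict String (List String))
    (hg : g ∉ d.items.map Prod.fst) (hm : m ≠ []) :
    (m.foldl (fun d r => d.modify g [] (· ++ [r])) d).items = d.items ++ [(g, m)] := by
  cases m with
  | nil => exact absurd rfl hm
  | cons r m =>
    have hcont : d.contains g = false := by
      rw [← Bool.not_eq_true, PySem.Dict.contains_iff_mem_keys]
      simpa [PySem.Dict.keys] using hg
    rw [List.foldl_cons]
    rw [foldl_modify_aux g m d.items [r] _ ?_ hg]
    · simp
    · show (d.insert g (d.getD g [] ++ [r])).items = _
      rw [PySem.Dict.getD_of_not_contains _ _ hcont,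
        PySem.Dict.items_insert_of_not_contains d _ hcont]
      simp

-- main loop invariant: A's dict fold and B's list fold agree item by item
lemma main_fold (batch : List String) :
    ∀ (G : List (String × String)) (d : PySem.Dict String (List String)),
      (G.map Prod.fst).Nodup →
      (∀ p ∈ G, p.1 ∉ d.items.map Prod.fst) →
      (G.foldl (fun gr gs =>
        let fs := extract_feature_sequences gs.2
        if fs.1 = "" ∨ fs.2.1 = "" ∨ fs.2.2 = "" then gr
        else batch.foldl (fun gr read_seq =>
          if PySem.Str.isIn fs.1 read_seq && PySem.Str.isIn fs.2.1 read_seq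
              && PySem.Str.isIn fs.2.2 read_seq
          then gr.modify gs.1 [] (· ++ [read_seq]) else gr) gr) d).items
      = G.foldl (fun acc gs =>
          if PySem.Str.len gs.2 < 120 then acc
          else
            let f1 := PySem.Str.slice gs.2 none (some 20)
            let f2 := PySem.Str.slice gs.2 (some 100) (some 120)
            let f3 := PySem.Str.slice gs.2 (some (-20)) none
            let hits := ((batch.zip (batch.map kmerSet)).filter
              (fun p => PySem.Set.contains p.2 f1 && PySem.Set.contains p.2 f2
                && PySem.Set.contains p.2 f3)).map Prod.fst
            if hits = [] then acc else acc ++ [(gs.1, hits)]) d.items := by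
  intro G
  induction G with
  | nil => intro d _ _; rfl
  | cons gs G ih =>
    intro d hnd hfresh
    obtain ⟨g, seq⟩ := gs
    simp only [List.map_cons, List.nodup_cons] at hnd
    rw [List.foldl_cons, List.foldl_cons]
    by_cases hgate : (let fs := extract_feature_sequences seq
        fs.1 = "" ∨ fs.2.1 = "" ∨ fs.2.2 = "")
    · -- gene skipped on both sides
      have hlt : PySem.Str.len seq < 120 := (gate_iff seq).mp hgate
      simp only at hgate
      rw [if_pos hgate, if_pos hlt]
      exact ih d hnd.2 (fun p hp => hfresh p (List.mem_cons_of_mem _ hp))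
    · have hlt : ¬ PySem.Str.len seq < 120 := fun h => hgate ((gate_iff seq).mpr h)
      have h120 : 120 ≤ seq.toList.length := by
        have := PySem.Str.len_eq seq; omega
      simp only at hgate
      rw [if_neg hgate, if_neg hlt]
      -- the three features and their lengths
      have hx : extract_feature_sequences seq =
          (PySem.Str.slice seq none (some 20),
           PySem.Str.slice seq (some 100) (some 120),
           PySem.Str.slice seq (some (-20)) none) := by
        rw [extract_feature_sequences]
        rw [if_pos (by rw [PySem.Str.len_eq]; exact_mod_cast h120),
            if_pos (by rw [PySem.Str.len_eq]; exact_mod_cast (by omega : 20 ≤ seq.toList.length))]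
      have hl1 : (PySem.Str.slice seq none (some 20)).toList.length = 20 := by
        rw [toList_f1, List.length_take]; omega
      have hl2 : (PySem.Str.slice seq (some 100) (some 120)).toList.length = 20 := by
        rw [toList_f2, List.length_take, List.length_drop]; omega
      have hl3 : (PySem.Str.slice seq (some (-20)) none).toList.length = 20 := by
        rw [toList_f3, List.length_drop]; omega
      -- B's candidate list equals A's filtered batch
      have hhits : ((batch.zip (batch.map kmerSet)).filter
            (fun p => PySem.Set.contains p.2 (PySem.Str.slice seq none (some 20))
              && PySem.Set.contains p.2 (PySem.Str.slice seq (some 100) (some 120))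
              && PySem.Set.contains p.2 (PySem.Str.slice seq (some (-20)) none))).map Prod.fst
          = batch.filter (fun r =>
              PySem.Str.isIn (PySem.Str.slice seq none (some 20)) r
              && PySem.Str.isIn (PySem.Str.slice seq (some 100) (some 120)) r
              && PySem.Str.isIn (PySem.Str.slice seq (some (-20)) none) r) := by
        rw [zip_map_filter]
        apply List.filter_congr
        intro r _
        rw [contains_kmerSet _ r hl1, contains_kmerSet _ r hl2, contains_kmerSet _ r hl3]
      rw [hx]
      set m := batch.filter (fun r =>
        PySem.Str.isIn (PySem.Str.slice seq none (some 20)) r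
        && PySem.Str.isIn (PySem.Str.slice seq (some 100) (some 120)) r
        && PySem.Str.isIn (PySem.Str.slice seq (some (-20)) none) r) with hmdef
      have hA : batch.foldl (fun gr read_seq =>
          if PySem.Str.isIn (PySem.Str.slice seq none (some 20)) read_seq
              && PySem.Str.isIn (PySem.Str.slice seq (some 100) (some 120)) read_seq
              && PySem.Str.isIn (PySem.Str.slice seq (some (-20)) none) read_seq
          then gr.modify g [] (· ++ [read_seq]) else gr) d
          = m.foldl (fun gr read_seq => gr.modify g [] (· ++ [read_seq])) d := by
        rw [hmdef, List.foldl_filter]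
      simp only [hhits, hA]
      by_cases hm : m = []
      · rw [hm, if_pos rfl, List.foldl_nil]
        exact ih d hnd.2 (fun p hp => hfresh p (List.mem_cons_of_mem _ hp))
      · rw [if_neg hm]
        have hgd : g ∉ d.items.map Prod.fst := hfresh (g, seq) List.mem_cons_self
        have hit := foldl_modify_items g m d hgd hm
        rw [ih _ hnd.2 ?_, hit]
        intro p hp
        rw [hit, List.map_append]
        simp only [List.map_cons, List.map_nil, List.mem_append, List.mem_cons]
        rintro (hin | hpg)
        · exact hfresh p (List.mem_cons_of_mem _ hp) hin
        · rcases hpg with hpg | hf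
          · exact hnd.1 (hpg ▸ List.mem_map_of_mem hp)
          · exact absurd hf (List.not_mem_nil)

-- ===== VERDICT (by name: the statement is the Claim_ definition above) =====
theorem feature_match_worker_spec : Claim_equal_feature_match_worker := by
  intro args _
  unfold Spec_feature_match_worker feature_match_worker feature_match_worker_alt
  have hnd : ((PySem.Dict.ofList args.2).items.map Prod.fst).Nodup := by
    have := PySem.Dict.nodup_keys_ofList (κ := String) (ν := String) args.2
    simpa [PySem.Dict.keys] using this
  simpa using main_fold args.1 (PySem.Dict.ofList args.2).items PySem.Dict.empty hnd
    (by intro p _ h; simp [PySem.Dict.empty] at h)
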